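-- pv_equiv track=rewrite | github.com/Jwata/DataStructures_Algorithms | geeksforgeeks/length-largest-subarray-contiguous-elements-set-1.py | largest_contigous_subarray
-- ===== SOURCE A (Python) =====
-- def largest_contigous_subarray(arr):
--     n = len(arr)
--     longest = 1
--     for i in range(n):
--         min_elem = arr[i]
--         max_elem = arr[i]
--         for j in range(i, n):
--             min_elem = min(min_elem, arr[j])
--             max_elem = max(max_elem, arr[j])
--
--             if max_elem - min_elem == j - i:
--                 length = j - i + 1
--                 longest = max(longest, length)
--
--     return longest
-- ===== SOURCE B (Python) =====
-- def largest_contigous_subarray(arr):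
--     n = len(arr)
--     longest = 1
--     for i in range(n):
--         for j in range(i, n):
--             sub = arr[i:j+1]
--             if max(sub) - min(sub) == j - i:
--                 longest = max(longest, len(sub))
--     return longest
-- ===== Notes on version B (the rewrite author's own statement) =====
-- stated objective: simpler
-- what changed: Replaces the incrementally maintained running min_elem/max_elem state of the inner loop by recomputing max and min of the whole slice arr[i:j+1] from scratch at every (i,j), a plainer stateless formulation.
import Mathlib
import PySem

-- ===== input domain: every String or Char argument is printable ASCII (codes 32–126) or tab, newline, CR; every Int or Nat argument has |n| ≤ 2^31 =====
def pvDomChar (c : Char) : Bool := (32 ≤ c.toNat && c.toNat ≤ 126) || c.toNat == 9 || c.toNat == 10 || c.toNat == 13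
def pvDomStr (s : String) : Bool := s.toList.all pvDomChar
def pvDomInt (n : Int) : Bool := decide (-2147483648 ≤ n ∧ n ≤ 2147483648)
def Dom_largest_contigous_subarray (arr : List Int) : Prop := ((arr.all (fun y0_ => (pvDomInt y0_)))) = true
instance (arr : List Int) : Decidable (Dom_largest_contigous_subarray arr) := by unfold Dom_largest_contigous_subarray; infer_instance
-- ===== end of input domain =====

-- B recomputes max/min of each slice arr[i:j+1] from scratch instead of A's running min/max state (objective: simpler; not faster).

-- ===== PORT A =====
-- A's inner-loop body: state (min_elem, max_elem, longest); j ranges over range(i, n).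
-- Indices i, j are always in range here, so arr.getD j 0 is exactly Python's arr[j].
def stepA (arr : List Int) (i : Nat) (st : Int × Int × Int) (j : Nat) : Int × Int × Int :=
  let x := arr.getD j 0
  let m := min st.1 x
  let M := max st.2.1 x
  (m, M, if M - m = (j : Int) - (i : Int) then max st.2.2 ((j : Int) - (i : Int) + 1) else st.2.2)

def largest_contigous_subarray (arr : List Int) : Int :=
  (List.range arr.length).foldl
    (fun longest i =>
      ((List.range' i (arr.length - i)).foldl (stepA arr i)
        (arr.getD i 0, arr.getD i 0, longest)).2.2)
    1

-- ===== PORT B =====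
-- B's inner-loop body: sub = arr[i:j+1]; max(sub)/min(sub) via PySem (sub is nonempty for i ≤ j < n,
-- so the catch-all branch is unreachable).
def stepB (arr : List Int) (i : Nat) (longest : Int) (j : Nat) : Int :=
  let sub := PySem.List.slice arr (some (i : Int)) (some ((j : Int) + 1))
  match PySem.List.max? sub (fun x => x), PySem.List.min? sub (fun x => x) with
  | some M, some m =>
      if M - m = (j : Int) - (i : Int) then max longest (sub.length : Int) else longest
  | _, _ => longest

def largest_contigous_subarray_alt (arr : List Int) : Int :=
  (List.range arr.length).foldl
    (fun longest i => (List.range' i (arr.length - i)).foldl (stepB arr i) longest)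
    1

-- ===== PRECONDITION & SPEC =====
def Spec_largest_contigous_subarray (arr : List Int) (out : Int) : Prop := out = largest_contigous_subarray_alt arr
instance (arr : List Int) (out : Int) : Decidable (Spec_largest_contigous_subarray arr out) := by unfold Spec_largest_contigous_subarray; infer_instance

-- ===== CLAIM (what is proved, stated in full; the proofs are below) =====
def Claim_equal_largest_contigous_subarray : Prop := ∀ (arr : List Int), Dom_largest_contigous_subarray arr → Spec_largest_contigous_subarray arr (largest_contigous_subarray arr)

-- ===== LEMMAS AND PROOFS =====

lemma foldl_min_cons_self (a : Int) (t : List Int) :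
    (a :: t).foldl min a = t.foldl min a := by simp [List.foldl]

lemma foldl_max_cons_self (a : Int) (t : List Int) :
    (a :: t).foldl max a = t.foldl max a := by simp [List.foldl]

-- Invariant of A's inner loop after k iterations (j = i .. i+k-1), compared with B's inner loop.
lemma inner_eq (arr : List Int) (i : Nat) (hi : i < arr.length) :
    ∀ (k : Nat), i + k ≤ arr.length → ∀ (L : Int),
      (List.range' i k).foldl (stepA arr i) (arr.getD i 0, arr.getD i 0, L)
      = (((arr.drop i).take k).foldl min (arr.getD i 0),
         ((arr.drop i).take k).foldl max (arr.getD i 0),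
         (List.range' i k).foldl (stepB arr i) L) := by
  intro k
  induction k with
  | zero => intro _ L; simp
  | succ k ih =>
    intro hk L
    have hik : i + k < arr.length := by omega
    have hrange : List.range' i (k + 1) = List.range' i k ++ [i + k] := by
      simpa using List.range'_concat (s := i) (n := k) (step := 1)
    have hdropk : k < (arr.drop i).length := by simp; omega
    have htake : (arr.drop i).take (k + 1) = (arr.drop i).take k ++ [(arr.drop i)[k]] :=
      List.take_succ_eq_append_getElem hdropk
    have hget : (arr.drop i)[k] = arr[i + k] := by
      rw [List.getElem_drop]
    have hgetD : arr.getD (i + k) 0 = arr[i + k] := List.getD_eq_getElem arr 0 hik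
    -- the element with which A's running min/max is updated
    set a := arr.getD i 0 with ha
    rw [hrange, List.foldl_append, List.foldl_append, ih (by omega) L]
    -- A's step at j = i + k
    have hcond : ((i + k : Nat) : Int) - (i : Int) = (k : Int) := by push_cast; ring
    -- B's slice at j = i + k
    have hsub : PySem.List.slice arr (some ((i : Nat) : Int)) (some (((i + k : Nat) : Int) + 1))
        = (arr.drop i).take (k + 1) := by
      have : (((i + k : Nat) : Int) + 1) = ((i + k + 1 : Nat) : Int) := by push_cast; ring
      rw [this]
      have := PySem.List.slice_natCast (xs := arr) (a := i) (b := i + k + 1)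
      simpa [Nat.add_sub_cancel_left, Nat.add_assoc] using this
    have hdropcons : arr.drop i = a :: arr.drop (i + 1) := by
      rw [ha, List.getD_eq_getElem arr 0 hi]
      exact List.drop_eq_getElem_cons hi
    have htakecons : (arr.drop i).take (k + 1) = a :: (arr.drop (i + 1)).take k := by
      rw [hdropcons]; simp
    have hlen : ((arr.drop i).take (k + 1)).length = k + 1 := by
      simp; omega
    have hminB : PySem.List.min? ((arr.drop i).take (k + 1)) (fun x => x)
        = some (((arr.drop i).take (k + 1)).foldl min a) := by
      rw [htakecons, PySem.List.min?_id_cons, foldl_min_cons_self]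
    have hmaxB : PySem.List.max? ((arr.drop i).take (k + 1)) (fun x => x)
        = some (((arr.drop i).take (k + 1)).foldl max a) := by
      rw [htakecons, PySem.List.max?_id_cons, foldl_max_cons_self]
    -- new running min/max = fold over the one-longer prefix
    have hmin' : min (((arr.drop i).take k).foldl min a) (arr.getD (i + k) 0)
        = ((arr.drop i).take (k + 1)).foldl min a := by
      rw [htake, List.foldl_append, hget, hgetD]; simp [List.foldl]
    have hmax' : max (((arr.drop i).take k).foldl max a) (arr.getD (i + k) 0)
        = ((arr.drop i).take (k + 1)).foldl max a := by
      rw [htake, List.foldl_append, hget, hgetD]; simp [List.foldl]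
    simp only [List.foldl_cons, List.foldl_nil, stepA, stepB]
    rw [hsub, hminB, hmaxB]
    simp only [hmin', hmax', hcond, hlen]
    push_cast
    ring_nf

-- ===== VERDICT (by name: the statement is the Claim_ definition above) =====
theorem largest_contigous_subarray_spec : Claim_equal_largest_contigous_subarray := by
  intro arr _
  unfold Spec_largest_contigous_subarray largest_contigous_subarray largest_contigous_subarray_alt
  apply PySem.List.foldl_congr_mem
  intro L i hi
  have hi' : i < arr.length := List.mem_range.mp hi
  rw [inner_eq arr i hi' (arr.length - i) (by omega) L]
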